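-- pv_equiv track=rewrite | github.com/arxxv/6Companies30Days | M1/9. Ds & Is.py | PrintMinNumberForPattern
-- ===== SOURCE A (Python) =====
-- def PrintMinNumberForPattern(s):
--     next, Dindex = 1, 0
--     ans = []
--     if s[0] == 'I':
--         ans += [1, 2]
--         Dindex = 1
--
--     else:
--         ans += [2, 1]
--         Dindex = 0
--
--     next = 3
--     for i in range(1, len(s)):
--         if s[i] == 'I':
--             ans.append(next)
--             next+=1
--             Dindex = i+1
--         else:
--             ans.append(ans[i])
--             for k in range(i, Dindex-1, -1):
--                 ans[k]+=1
--             next+=1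
--     return ans
-- ===== SOURCE B (Python) =====
-- def PrintMinNumberForPattern(s):
--     res = []
--     stack = []
--     for i in range(len(s) + 1):
--         stack.append(i + 1)
--         if i == len(s) or s[i] == 'I':
--             res.extend(reversed(stack))
--             stack = []
--     return res
-- ===== Notes on version B (the rewrite author's own statement) =====
-- stated objective: faster
-- what changed: Replaced A's quadratic scheme (append, then walk back incrementing every element since the last increase mark) by the standard O(n) stack algorithm: push i+1 at each position and flush the stack in reverse at each increase mark and at the end.
import Mathlib
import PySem

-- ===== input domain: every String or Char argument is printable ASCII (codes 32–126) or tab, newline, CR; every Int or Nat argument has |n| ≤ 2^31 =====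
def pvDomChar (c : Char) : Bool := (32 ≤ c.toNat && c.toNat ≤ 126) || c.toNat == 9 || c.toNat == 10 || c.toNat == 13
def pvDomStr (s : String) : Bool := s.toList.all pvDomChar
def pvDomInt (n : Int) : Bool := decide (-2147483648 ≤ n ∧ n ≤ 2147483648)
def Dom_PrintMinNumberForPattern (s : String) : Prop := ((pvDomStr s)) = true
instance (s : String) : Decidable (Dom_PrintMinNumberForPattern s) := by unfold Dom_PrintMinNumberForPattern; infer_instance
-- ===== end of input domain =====

-- B replaces A's quadratic append-then-increment-backwards scheme by the standard
-- one-pass stack algorithm (push i+1, flush in reverse at each increase mark and at the end): objective = faster (asymptotic).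

-- ===== PORT A =====
-- one loop iteration of A's main for-loop (state: ans, next, Dindex)
def pvAStep (cs : List Char) (st : List Int × Int × Int) (i : Int) : List Int × Int × Int :=
  if PySem.List.pyGetD cs i ' ' = 'I' then
    (st.1 ++ [st.2.1], st.2.1 + 1, i + 1)
  else
    let ans1 := st.1 ++ [PySem.List.pyGetD st.1 i 0]
    let ans2 := (PySem.List.pyRange i (st.2.2 - 1) (-1)).foldl
      (fun a k => PySem.List.pySetD a k (PySem.List.pyGetD a k 0 + 1)) ans1
    (ans2, st.2.1 + 1, st.2.2)

def PrintMinNumberForPattern (s : String) : List Int :=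
  let cs := s.toList
  match PySem.List.pyGet? cs 0 with
  | none => []   -- Python raises IndexError on s[0] here; excluded by Pre_
  | some c0 =>
    let init : List Int × Int := if c0 = 'I' then ([1, 2], 1) else ([2, 1], 0)
    ((PySem.List.pyRange 1 (cs.length : Int) 1).foldl (pvAStep cs) (init.1, 3, init.2)).1

-- ===== PORT B =====
-- one loop iteration of B's loop (state: res, stack)
def pvBStep (cs : List Char) (st : List Int × List Int) (i : Int) : List Int × List Int :=
  let stack := st.2 ++ [i + 1]
  if i = (cs.length : Int) ∨ PySem.List.pyGetD cs i ' ' = 'I' then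
    (st.1 ++ stack.reverse, [])
  else
    (st.1, stack)

def PrintMinNumberForPattern_alt (s : String) : List Int :=
  ((PySem.List.pyRange 0 ((s.toList.length : Int) + 1) 1).foldl (pvBStep s.toList) ([], [])).1

-- ===== PRECONDITION & SPEC =====
-- Pre_ excludes only the empty string, on which the Python A raises IndexError (s[0]).
def Pre_PrintMinNumberForPattern (s : String) : Prop := s.toList ≠ []
instance (s : String) : Decidable (Pre_PrintMinNumberForPattern s) := by
  unfold Pre_PrintMinNumberForPattern; infer_instance
def pvWitness_PrintMinNumberForPattern : String := "DID"

def Spec_PrintMinNumberForPattern (s : String) (out : List Int) : Prop := out = PrintMinNumberForPattern_alt s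
instance (s : String) (out : List Int) : Decidable (Spec_PrintMinNumberForPattern s out) := by unfold Spec_PrintMinNumberForPattern; infer_instance

-- ===== CLAIM (what is proved, stated in full; the proofs are below) =====
def Claim_equal_PrintMinNumberForPattern : Prop := ∀ (s : String), Dom_PrintMinNumberForPattern s → Pre_PrintMinNumberForPattern s → Spec_PrintMinNumberForPattern s (PrintMinNumberForPattern s)

-- ===== LEMMAS AND PROOFS =====

-- the stack [d+1, d+2, ..., m] as a list of Ints
def pvStk (d m : Nat) : List Int := (List.range (m - d)).map (fun j : Nat => (d : Int) + 1 + j)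

-- descending index list [d+n-1, ..., d]
def pvDescIdx (d n : Nat) : List Int := (List.range n).map (fun k : Nat => (d : Int) + n - 1 - k)

lemma pvStk_self (d : Nat) : pvStk d d = [] := by simp [pvStk]

lemma pvStk_length (d m : Nat) : (pvStk d m).length = m - d := by simp [pvStk]

lemma pvStk_snoc (d m : Nat) (h : d ≤ m) :
    pvStk d m ++ [(m : Int) + 1] = pvStk d (m + 1) := by
  unfold pvStk
  rw [show m + 1 - d = (m - d) + 1 by omega, List.range_succ, List.map_append,
    List.map_singleton]
  congr 2
  push_cast [Nat.cast_sub h]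
  ring

lemma pvStk_cons (d m : Nat) (h : d < m) :
    pvStk d m = ((d : Int) + 1) :: pvStk (d + 1) m := by
  unfold pvStk
  rw [show m - d = (m - (d + 1)) + 1 by omega, List.range_succ_eq_map]
  simp only [List.map_cons, List.map_map]
  congr 1
  apply List.map_congr_left
  intro a _
  simp [Function.comp]
  ring

lemma pvStk_map_succ (d m : Nat) :
    (pvStk d m).map (· + 1) = pvStk (d + 1) (m + 1) := by
  unfold pvStk
  rw [show m + 1 - (d + 1) = m - d by omega, List.map_map]
  apply List.map_congr_left
  intro a _
  simp [Function.comp]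
  ring

lemma pvDescIdx_succ (d n : Nat) :
    pvDescIdx d (n + 1) = ((d : Int) + n) :: pvDescIdx d n := by
  unfold pvDescIdx
  rw [List.range_succ_eq_map]
  simp only [List.map_cons, List.map_map]
  congr 1
  · push_cast; ring
  · apply List.map_congr_left
    intro a _
    simp [Function.comp]
    ring

-- A's countdown range over the still-mutable suffix is the descending index list over the stack segment
lemma pvRange_desc (d m : Nat) (h : d ≤ m) :
    PySem.List.pyRange (m : Int) ((d : Int) - 1) (-1) = pvDescIdx d (m + 1 - d) := by
  rw [PySem.List.pyRange_neg_one]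
  unfold pvDescIdx
  rw [show ((m : Int) - ((d : Int) - 1)).toNat = m + 1 - d by omega]
  apply List.map_congr_left
  intro a _
  have : ((m + 1 - d : Nat) : Int) = (m : Int) + 1 - d := by omega
  rw [this]
  ring

-- A's inner increment loop over the descending indices covering exactly M
lemma pvIncAll (M : List Int) : ∀ (res T : List Int),
    (pvDescIdx res.length M.length).foldl
      (fun a k => PySem.List.pySetD a k (PySem.List.pyGetD a k 0 + 1)) (res ++ (M ++ T))
    = res ++ (M.map (· + 1) ++ T) := by
  induction M using List.reverseRecOn with
  | nil => intro res T; simp [pvDescIdx]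
  | append_singleton M' x ih =>
    intro res T
    rw [List.length_append, List.length_singleton, pvDescIdx_succ, List.foldl_cons]
    have hidx : ((res.length : Int) + (M'.length : Int)) = ((res.length + M'.length : Nat) : Int) := by
      push_cast; ring
    have hget : PySem.List.pyGetD (res ++ ((M' ++ [x]) ++ T)) ((res.length : Int) + (M'.length : Int)) 0 = x := by
      rw [hidx, PySem.List.pyGetD_natCast]
      rw [List.append_assoc M' [x] T, ← List.append_assoc res M']
      rw [List.getD_append_right (res ++ M') ([x] ++ T) 0 _ (by simp)]
      simp
    have hset : PySem.List.pySetD (res ++ ((M' ++ [x]) ++ T)) ((res.length : Int) + (M'.length : Int)) (x + 1)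
        = res ++ (M' ++ ([x + 1] ++ T)) := by
      rw [hidx, PySem.List.pySetD_natCast]
      rw [List.append_assoc M' [x] T, ← List.append_assoc res M']
      rw [List.set_append_right _ _ (by simp)]
      simp
    rw [hget, hset, ih res ([x + 1] ++ T)]
    simp

-- the main invariant: after m loop steps the two states correspond
lemma pvStk_singleton (d : Nat) : pvStk d (d + 1) = [(d : Int) + 1] := by
  simp [pvStk]

-- the main invariant: after m loop steps the two states correspond
lemma pvInv (cs : List Char) (c0 : Char) (t : List Char) (hcs : cs = c0 :: t) :
    ∀ m : Nat, 1 ≤ m → m ≤ cs.length →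
    ∃ (res : List Int) (d : Nat), d ≤ m ∧ res.length = d ∧
      (PySem.List.pyRange 0 (m : Int) 1).foldl (pvBStep cs) ([], []) = (res, pvStk d m) ∧
      (PySem.List.pyRange 1 (m : Int) 1).foldl (pvAStep cs)
          ((if c0 = 'I' then (([1, 2] : List Int), (1 : Int)) else ([2, 1], 0)).1, 3,
           (if c0 = 'I' then (([1, 2] : List Int), (1 : Int)) else ([2, 1], 0)).2)
        = (res ++ (pvStk d (m + 1)).reverse, (m : Int) + 2, (d : Int)) := by
  intro m hm
  induction m, hm using Nat.le_induction with
  | base =>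
    intro hlen
    have h01 : PySem.List.pyRange 0 ((1 : Nat) : Int) 1 = [0] := by
      rw [Nat.cast_one]; decide
    have h11 : PySem.List.pyRange 1 ((1 : Nat) : Int) 1 = [] := by
      rw [Nat.cast_one]; decide
    rw [h01, h11, List.foldl_cons, List.foldl_nil, List.foldl_nil]
    have hget0 : PySem.List.pyGetD cs 0 ' ' = c0 := by
      rw [hcs]; exact PySem.List.pyGetD_zero_cons c0 t ' '
    have hne0 : ¬ ((0 : Int) = (cs.length : Int)) := by
      rw [hcs]; simp; omega
    by_cases hI : c0 = 'I'
    · refine ⟨[1], 1, by omega, rfl, ?_, ?_⟩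
      · unfold pvBStep
        rw [if_pos (Or.inr (hget0.trans (by rw [hI])))]
        decide
      · rw [hI]; decide
    · refine ⟨[], 0, by omega, rfl, ?_, ?_⟩
      · unfold pvBStep
        rw [if_neg (fun h => h.elim hne0 (fun h2 => hI ((hget0.symm.trans h2))))]
        decide
      · rw [if_neg hI]; decide
  | succ m hm ih =>
    intro hlen
    obtain ⟨res, d, hd, hres, hB, hA⟩ := ih (by omega)
    have hmlen : m < cs.length := by omega
    have hsplit0 : PySem.List.pyRange 0 ((m + 1 : Nat) : Int) 1
        = PySem.List.pyRange 0 (m : Int) 1 ++ [(m : Int)] := by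
      rw [show ((m + 1 : Nat) : Int) = (m : Int) + 1 by push_cast; ring]
      exact PySem.List.pyRange_one_succ_right (by positivity)
    have hsplit1 : PySem.List.pyRange 1 ((m + 1 : Nat) : Int) 1
        = PySem.List.pyRange 1 (m : Int) 1 ++ [(m : Int)] := by
      rw [show ((m + 1 : Nat) : Int) = (m : Int) + 1 by push_cast; ring]
      exact PySem.List.pyRange_one_succ_right (by exact_mod_cast hm)
    have hgetm : PySem.List.pyGetD cs (m : Int) ' ' = cs[m] := by
      rw [PySem.List.pyGetD_natCast, List.getD_eq_getElem cs ' ' hmlen]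
    have hnem : ¬ ((m : Int) = (cs.length : Int)) := by
      intro h; omega
    rw [hsplit0, hsplit1, List.foldl_append, List.foldl_append, hB, hA]
    rw [List.foldl_cons, List.foldl_nil, List.foldl_cons, List.foldl_nil]
    by_cases hI : cs[m] = 'I'
    · refine ⟨res ++ (pvStk d (m + 1)).reverse, m + 1, by omega, ?_, ?_, ?_⟩
      · simp [hres, pvStk_length]; omega
      · unfold pvBStep
        rw [if_pos (Or.inr (hgetm.trans (by rw [hI])))]
        rw [Prod.mk.injEq]
        exact ⟨by rw [pvStk_snoc d m hd], by rw [pvStk_self]⟩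
      · unfold pvAStep
        rw [if_pos (hgetm.trans (by rw [hI]))]
        rw [Prod.mk.injEq, Prod.mk.injEq]
        refine ⟨?_, by push_cast; ring, by push_cast; ring⟩
        rw [show m + 1 + 1 = (m + 1) + 1 by ring, pvStk_singleton (m + 1)]
        simp
        ring
    · have hansget : PySem.List.pyGetD (res ++ (pvStk d (m + 1)).reverse) (m : Int) 0
          = (d : Int) + 1 := by
        rw [PySem.List.pyGetD_natCast,
          List.getD_append_right res _ 0 m (by omega),
          pvStk_cons d (m + 1) (by omega)]
        simp only [List.reverse_cons]
        rw [List.getD_append_right _ _ 0 _ (by simp [pvStk_length]; omega)]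
        simp [pvStk_length, hres]
      refine ⟨res, d, by omega, hres, ?_, ?_⟩
      · unfold pvBStep
        rw [if_neg (fun h => h.elim hnem (fun h2 => hI (hgetm.symm.trans h2)))]
        rw [Prod.mk.injEq]
        exact ⟨rfl, by rw [pvStk_snoc d m hd]⟩
      · unfold pvAStep
        rw [if_neg (fun h => hI (hgetm.symm.trans h))]
        simp only [hansget]
        have hrng : PySem.List.pyRange (m : Int) ((d : Int) - 1) (-1)
            = pvDescIdx res.length ((pvStk d (m + 1)).reverse).length := by
          rw [pvRange_desc d m hd, hres]
          congr 1
          simp [pvStk_length]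
        have hfold := pvIncAll ((pvStk d (m + 1)).reverse) res [(d : Int) + 1]
        rw [← List.append_assoc] at hfold
        rw [Prod.mk.injEq, Prod.mk.injEq]
        refine ⟨?_, by push_cast; ring, rfl⟩
        rw [hrng, hfold]
        rw [List.map_reverse, pvStk_map_succ d (m + 1),
          show pvStk d (m + 1 + 1) = ((d : Int) + 1) :: pvStk (d + 1) (m + 1 + 1) from
            pvStk_cons d (m + 2) (by omega)]
        simp

-- ===== VERDICT (by name: the statement is the Claim_ definition above) =====
theorem PrintMinNumberForPattern_spec : Claim_equal_PrintMinNumberForPattern := by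
  intro s _ hpre
  show PrintMinNumberForPattern s = PrintMinNumberForPattern_alt s
  cases hcs : s.toList with
  | nil => exact absurd hcs hpre
  | cons c0 t =>
    have hlen : 1 ≤ s.toList.length := by rw [hcs]; simp
    obtain ⟨res, d, hd, hres, hB, hA⟩ :=
      pvInv s.toList c0 t hcs s.toList.length hlen (le_refl _)
    have hget : PySem.List.pyGet? s.toList 0 = some c0 := by
      rw [hcs]; simp [PySem.List.pyGet?, PySem.List.pyIdx?]
    have hsplit : PySem.List.pyRange 0 ((s.toList.length : Int) + 1) 1
        = PySem.List.pyRange 0 (s.toList.length : Int) 1 ++ [(s.toList.length : Int)] :=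
      PySem.List.pyRange_one_succ_right (by positivity)
    unfold PrintMinNumberForPattern PrintMinNumberForPattern_alt
    simp only [hget, hA, hsplit, List.foldl_append, hB, List.foldl_cons, List.foldl_nil]
    unfold pvBStep
    rw [if_pos (Or.inl rfl)]
    rw [pvStk_snoc d s.toList.length hd]
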